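-- pv_equiv track=rewrite | github.com/Adrian-Yan16/Algorithm | dynamic_process/combinationSum.py | combinationSum2_back
-- ===== SOURCE A (Python) =====
-- def combinationSum2_back(candidates, target: int):
--     candidates.sort()
--     res = []
--
--     def find(s, use, remain):
--         for i in range(s, len(candidates)):
--             if i > s and candidates[i] == candidates[i - 1]:
--                 continue
--             c = candidates[i]
--             if c == remain:
--                 res.append(use + [c])
--                 return
--             elif c < remain:
--                 find(i + 1, use + [c], remain - c)
--             else:
--                 return
--
--     find(0, [], target)
--     return res
-- ===== SOURCE B (Python) =====
-- def combinationSum2_back(candidates, target: int):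
--     # Same return value as A; also sorts `candidates` in place like A.
--     candidates.sort()
--     n = len(candidates)
--     res = []
--
--     def find(i, use, remain):
--         if i >= n:
--             return
--         c = candidates[i]
--         if c > remain:
--             return
--         if c == remain:
--             res.append(use + [c])
--         else:
--             find(i + 1, use + [c], remain - c)
--         j = i
--         while j < n and candidates[j] == c:
--             j += 1
--         find(j, use, remain)
--
--     find(0, [], target)
--     return res
-- ===== Notes on version B (the rewrite author's own statement) =====
-- stated objective: alternative
-- what changed: A's in-loop backtracking (a for-loop from s that skips adjacent duplicates and recurses per element) is replaced by a take/skip binary recursion: take candidates[i] then jump the index past all duplicates of it with a while loop and recurse on the skip branch.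
import Mathlib
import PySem

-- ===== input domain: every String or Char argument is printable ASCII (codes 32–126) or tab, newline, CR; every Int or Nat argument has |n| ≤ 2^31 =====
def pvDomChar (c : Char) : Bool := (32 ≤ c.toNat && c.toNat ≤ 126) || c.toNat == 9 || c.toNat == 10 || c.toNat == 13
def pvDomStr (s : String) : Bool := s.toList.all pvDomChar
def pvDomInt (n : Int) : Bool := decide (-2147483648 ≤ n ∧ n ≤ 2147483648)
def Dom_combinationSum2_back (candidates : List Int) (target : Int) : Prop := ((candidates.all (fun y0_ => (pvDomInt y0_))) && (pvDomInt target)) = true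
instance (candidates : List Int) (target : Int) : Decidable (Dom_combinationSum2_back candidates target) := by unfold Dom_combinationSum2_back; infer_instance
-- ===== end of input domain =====

-- B replaces A's duplicate-skipping for-loop with a take/skip binary recursion (take the
-- current value, then jump past all its duplicates); same return value, same in-place sort
-- of `candidates` (equivalence proved for the RETURN value; B performs the same mutation).

-- ===== PORT A =====
-- A's nested `find` + its for-loop: `s` is the loop's start, `i` the current loop index;
-- `res` is threaded as an accumulator (Python mutates a shared list); the local
-- `c = candidates[i]` is written inline. All accesses are at i < n = length, so `getD _ 0`
-- is exact here.
def findA (l : List Int) (n : Nat) (s i : Nat) (use : List Int) (remain : Int)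
    (res : List (List Int)) : List (List Int) :=
  if _h : i < n then
    if i > s ∧ l.getD i 0 = l.getD (i - 1) 0 then
      findA l n s (i + 1) use remain res                       -- continue
    else
      if l.getD i 0 = remain then res ++ [use ++ [l.getD i 0]] -- append; return
      else if l.getD i 0 < remain then
        findA l n s (i + 1) use remain
          (findA l n (i + 1) (i + 1) (use ++ [l.getD i 0]) (remain - l.getD i 0) res)
      else res                                                 -- return
  else res
termination_by n - i
decreasing_by all_goals omega

def combinationSum2_back (candidates : List Int) (target : Int) : List (List Int) :=
  let cs := PySem.List.sorted candidates (fun x => x) false    -- candidates.sort()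
  findA cs cs.length 0 0 [] target []

-- ===== PORT B =====
-- B's `while j < n and candidates[j] == c: j += 1`
def skipEq (l : List Int) (n : Nat) (j : Nat) (c : Int) : Nat :=
  if _h : j < n then
    if l.getD j 0 = c then skipEq l n (j + 1) c else j
  else j
termination_by n - j
decreasing_by omega

-- needed by findB's termination: the skip pointer strictly advances
theorem skipEq_le (l : List Int) (n : Nat) (c : Int) (j : Nat) : j ≤ skipEq l n j c := by
  rw [skipEq]
  by_cases hj : j < n
  · rw [dif_pos hj]
    by_cases he : l.getD j 0 = c
    · rw [if_pos he]; have := skipEq_le l n c (j + 1); omega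
    · rw [if_neg he]
  · rw [dif_neg hj]
termination_by n - j
decreasing_by omega

theorem skipEq_gt (l : List Int) (n : Nat) (j : Nat) (hj : j < n) :
    j < skipEq l n j (l.getD j 0) := by
  rw [skipEq, dif_pos hj, if_pos rfl]
  have := skipEq_le l n (l.getD j 0) (j + 1); omega

-- B's `find(i, use, remain)`; the local `c = candidates[i]` is written inline.
def findB (l : List Int) (n : Nat) (i : Nat) (use : List Int) (remain : Int)
    (res : List (List Int)) : List (List Int) :=
  if _h : i < n then
    if l.getD i 0 > remain then res
    else
      findB l n (skipEq l n i (l.getD i 0)) use remain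
        (if l.getD i 0 = remain then res ++ [use ++ [l.getD i 0]]
         else findB l n (i + 1) (use ++ [l.getD i 0]) (remain - l.getD i 0) res)
  else res
termination_by n - i
decreasing_by
  · omega
  · exact Nat.sub_lt_sub_left _h (skipEq_gt l n i _h)

def combinationSum2_back_alt (candidates : List Int) (target : Int) : List (List Int) :=
  let cs := PySem.List.sorted candidates (fun x => x) false    -- candidates.sort()
  findB cs cs.length 0 [] target []

-- ===== PRECONDITION & SPEC =====
def Spec_combinationSum2_back (candidates : List Int) (target : Int) (out : List (List Int)) : Prop := out = combinationSum2_back_alt candidates target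
instance (candidates : List Int) (target : Int) (out : List (List Int)) : Decidable (Spec_combinationSum2_back candidates target out) := by unfold Spec_combinationSum2_back; infer_instance

-- ===== CLAIM (what is proved, stated in full; the proofs are below) =====
def Claim_equal_combinationSum2_back : Prop := ∀ (candidates : List Int) (target : Int), Dom_combinationSum2_back candidates target → Spec_combinationSum2_back candidates target (combinationSum2_back candidates target)

-- ===== LEMMAS AND PROOFS =====

-- the value at the skip pointer differs from c (when in range)
theorem skipEq_ne (l : List Int) (n : Nat) (c : Int) (j : Nat) :
    skipEq l n j c < n → l.getD (skipEq l n j c) 0 ≠ c := by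
  intro h
  rw [skipEq] at h ⊢
  by_cases hj : j < n
  · rw [dif_pos hj] at h ⊢
    by_cases he : l.getD j 0 = c
    · rw [if_pos he] at h ⊢; exact skipEq_ne l n c (j + 1) h
    · rw [if_neg he] at h ⊢; exact he
  · rw [dif_neg hj] at h; exact absurd h hj
termination_by n - j
decreasing_by omega

-- one step of the skip loop past an equal element
theorem skipEq_step (l : List Int) (n : Nat) (c : Int) (j : Nat) (hj : j < n)
    (he : l.getD j 0 = c) : skipEq l n j c = skipEq l n (j + 1) c := by
  rw [skipEq, dif_pos hj, if_pos he]

-- after an exact hit, B's skip call returns immediately (sortedness pushes l[j] above remain)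
theorem findB_after_hit (l : List Int) (n : Nat)
    (hs : ∀ a b : Nat, a ≤ b → b < n → l.getD a 0 ≤ l.getD b 0)
    (k : Nat) (use : List Int) (res1 : List (List Int)) :
    findB l n (skipEq l n k (l.getD k 0)) use (l.getD k 0) res1 = res1 := by
  rw [findB]
  by_cases hjn : skipEq l n k (l.getD k 0) < n
  · rw [dif_pos hjn]
    have hle : k ≤ skipEq l n k (l.getD k 0) := skipEq_le l n _ k
    have hne := skipEq_ne l n (l.getD k 0) k hjn
    have hge := hs k _ hle hjn
    rw [if_pos (lt_of_le_of_ne hge (Ne.symm hne))]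
  · rw [dif_neg hjn]

-- Main equivalence, by induction on the fuel m ≥ n - i:
--  P: A's find started at i equals B's find at i;
--  Q: A's loop resumed at k (start i < k) equals B's find at the next index with a value
--     distinct from l[k-1] (the element A's duplicate test compares against).
theorem findAB (l : List Int) (n : Nat)
    (hs : ∀ a b : Nat, a ≤ b → b < n → l.getD a 0 ≤ l.getD b 0) :
    ∀ m : Nat,
      (∀ i use remain res, n - i ≤ m →
        findA l n i i use remain res = findB l n i use remain res) ∧
      (∀ i k use remain res, i < k → n - k ≤ m →
        findA l n i k use remain res
          = findB l n (skipEq l n k (l.getD (k - 1) 0)) use remain res) := by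
  intro m
  induction m with
  | zero =>
    constructor
    · intro i use remain res hm
      rw [findA, findB, dif_neg (by omega : ¬ i < n), dif_neg (by omega : ¬ i < n)]
    · intro i k use remain res hik hm
      rw [findA, skipEq, dif_neg (by omega : ¬ k < n), dif_neg (by omega : ¬ k < n),
        findB, dif_neg (by omega : ¬ k < n)]
  | succ m ih =>
    constructor
    · -- P
      intro i use remain res hm
      by_cases hi : i < n
      · rw [findA, findB, dif_pos hi, dif_pos hi,
          if_neg (by omega : ¬ (i > i ∧ l.getD i 0 = l.getD (i - 1) 0))]
        by_cases hcr : l.getD i 0 = remain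
        · rw [if_pos hcr, if_neg (by omega : ¬ l.getD i 0 > remain), if_pos hcr, ← hcr]
          exact (findB_after_hit l n hs i use _).symm
        · rw [if_neg hcr]
          by_cases hlt : l.getD i 0 < remain
          · rw [if_pos hlt, if_neg (by omega : ¬ l.getD i 0 > remain), if_neg hcr,
              ih.1 (i + 1) _ _ _ (by omega)]
            have h2 := ih.2 i (i + 1) use remain
              (findB l n (i + 1) (use ++ [l.getD i 0]) (remain - l.getD i 0) res)
              (by omega) (by omega)
            rw [Nat.add_sub_cancel] at h2
            rw [h2, skipEq_step l n (l.getD i 0) i hi rfl]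
          · rw [if_neg hlt, if_pos (by omega : l.getD i 0 > remain)]
      · rw [findA, findB, dif_neg hi, dif_neg hi]
    · -- Q
      intro i k use remain res hik hm
      by_cases hk : k < n
      · rw [findA, dif_pos hk]
        by_cases heq : l.getD k 0 = l.getD (k - 1) 0
        · rw [if_pos ⟨by omega, heq⟩, skipEq, dif_pos hk, if_pos heq]
          have h := ih.2 i (k + 1) use remain res (by omega) (by omega)
          rw [Nat.add_sub_cancel] at h
          rw [h, heq]
        · rw [if_neg (fun hcon => heq hcon.2),
            skipEq, dif_pos hk, if_neg heq, findB, dif_pos hk]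
          -- A processes index k fresh; B's skip loop stopped right at k
          by_cases hcr : l.getD k 0 = remain
          · rw [if_pos hcr, if_neg (by omega : ¬ l.getD k 0 > remain), if_pos hcr, ← hcr]
            exact (findB_after_hit l n hs k use _).symm
          · rw [if_neg hcr]
            by_cases hlt : l.getD k 0 < remain
            · rw [if_pos hlt, if_neg (by omega : ¬ l.getD k 0 > remain), if_neg hcr,
                ih.1 (k + 1) _ _ _ (by omega)]
              have h2 := ih.2 i (k + 1) use remain
                (findB l n (k + 1) (use ++ [l.getD k 0]) (remain - l.getD k 0) res)
                (by omega) (by omega)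
              rw [Nat.add_sub_cancel] at h2
              rw [h2, skipEq_step l n (l.getD k 0) k hk rfl]
            · rw [if_neg hlt, if_pos (by omega : l.getD k 0 > remain)]
      · rw [findA, dif_neg hk, skipEq, dif_neg hk, findB, dif_neg hk]

-- the sorted list is pointwise monotone under getD (indices below the length)
theorem sorted_getD_mono (xs : List Int) :
    ∀ a b : Nat, a ≤ b → b < (PySem.List.sorted xs (fun x => x) false).length →
      (PySem.List.sorted xs (fun x => x) false).getD a 0
        ≤ (PySem.List.sorted xs (fun x => x) false).getD b 0 := by
  intro a b hab hb
  have ha : a < (PySem.List.sorted xs (fun x => x) false).length := by omega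
  rw [List.getD_eq_getElem _ _ ha, List.getD_eq_getElem _ _ hb]
  exact PySem.List.key_sorted_getElem_mono xs (fun x => x) hab hb

-- ===== VERDICT (by name: the statement is the Claim_ definition above) =====
theorem combinationSum2_back_spec : Claim_equal_combinationSum2_back := by
  intro candidates target _
  unfold Spec_combinationSum2_back combinationSum2_back combinationSum2_back_alt
  exact (findAB _ _ (sorted_getD_mono candidates) _).1 0 [] target [] (le_refl _)
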